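-- pv_equiv track=rewrite | github.com/Ash-Kulkarni/advent-of-code | python/2015/day-11/main.py | has_three_letter_straight
-- ===== SOURCE A (Python) =====
-- def has_three_letter_straight(s: str) -> bool:
--
--     for i in range(len(s) - 2):
--
--         a, b, c = s[i], s[i + 1], s[i + 2]
--         x = ord(a)
--         y = ord(b)
--         z = ord(c)
--
--         if x + 1 == y and y + 1 == z:
--             return True
--
--     return False
-- ===== SOURCE B (Python) =====
-- def has_three_letter_straight(s: str) -> bool:
--     if not s:
--         return False
--     prev = ord(s[0])
--     run = 1
--     for ch in s[1:]:
--         o = ord(ch)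
--         if o == prev + 1:
--             run += 1
--             if run == 3:
--                 return True
--         else:
--             run = 1
--         prev = o
--     return False
-- ===== Notes on version B (the rewrite author's own statement) =====
-- stated objective: alternative
-- what changed: Replaces the fixed width-3 window check over indices i, i+1, i+2 with a single streaming scan that maintains the previous character's ordinal and the current consecutive-increasing run length, returning True the moment the run reaches 3.
import Mathlib
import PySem

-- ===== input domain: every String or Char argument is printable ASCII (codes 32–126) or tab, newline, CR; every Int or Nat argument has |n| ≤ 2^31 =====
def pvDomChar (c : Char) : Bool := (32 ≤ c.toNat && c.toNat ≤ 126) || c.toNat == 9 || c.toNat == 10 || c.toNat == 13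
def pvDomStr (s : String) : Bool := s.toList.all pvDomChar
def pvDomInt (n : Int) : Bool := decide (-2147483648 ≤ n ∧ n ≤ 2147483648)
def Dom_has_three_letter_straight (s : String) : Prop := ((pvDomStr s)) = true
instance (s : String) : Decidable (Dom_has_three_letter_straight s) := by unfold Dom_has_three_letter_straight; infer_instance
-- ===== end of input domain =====

-- B replaces A's indexed width-3 window check by a streaming scan keeping the previous ordinal and the current increasing-run length (alternative decomposition, same cost).

-- ===== PORT A =====
-- A's index loop over i in range(len(s)-2), testing the window s[i],s[i+1],s[i+2],
-- transcribed as the obvious structural recursion over the same successive windows.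
def pvAWindows : List Char → Bool
  | a :: b :: c :: rest =>
      if a.toNat + 1 == b.toNat && b.toNat + 1 == c.toNat then true
      else pvAWindows (b :: c :: rest)
  | _ => false

def has_three_letter_straight (s : String) : Bool := pvAWindows s.toList

-- ===== PORT B =====
-- B's loop: state = (previous ordinal, run length); run+1 == 3 triggers True.
def pvBRun : List Char → Nat → Nat → Bool
  | [], _, _ => false
  | ch :: rest, prev, run =>
      let o := ch.toNat
      if o == prev + 1 then
        if run + 1 == 3 then true else pvBRun rest o (run + 1)
      else pvBRun rest o 1

def has_three_letter_straight_alt (s : String) : Bool :=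
  match s.toList with
  | [] => false
  | c :: rest => pvBRun rest c.toNat 1

-- ===== PRECONDITION & SPEC =====
def Spec_has_three_letter_straight (s : String) (out : Bool) : Prop := out = has_three_letter_straight_alt s
instance (s : String) (out : Bool) : Decidable (Spec_has_three_letter_straight s out) := by unfold Spec_has_three_letter_straight; infer_instance

-- ===== CLAIM (what is proved, stated in full; the proofs are below) =====
def Claim_equal_has_three_letter_straight : Prop := ∀ (s : String), Dom_has_three_letter_straight s → Spec_has_three_letter_straight s (has_three_letter_straight s)

-- ===== LEMMAS AND PROOFS =====

-- Dropping a head that cannot start a straight does not change A's answer.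
theorem pvAWindows_drop_head (x c : Char) (t : List Char)
    (h : ¬ (x.toNat + 1 = c.toNat)) :
    pvAWindows (x :: c :: t) = pvAWindows (c :: t) := by
  cases t with
  | nil => rfl
  | cons d t' =>
    simp only [pvAWindows]
    rw [if_neg]
    simp [h]

-- Joint invariant: run = 1 after reading x, and run = 2 after reading x then y = x+1.
theorem pvB_eq_pvA (l : List Char) :
    (∀ x : Char, pvBRun l x.toNat 1 = pvAWindows (x :: l)) ∧
    (∀ x y : Char, y.toNat = x.toNat + 1 →
      pvBRun l y.toNat 2 = pvAWindows (x :: y :: l)) := by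
  induction l with
  | nil =>
    constructor
    · intro x; cases hx : x.toNat <;> rfl
    · intro x y _; rfl
  | cons c t ih =>
    constructor
    · intro x
      by_cases h : c.toNat = x.toNat + 1
      · simp only [pvBRun]
        rw [if_pos (by simpa using h)]
        simpa using ih.2 x c h
      · simp only [pvBRun]
        rw [if_neg (by simpa using h)]
        rw [ih.1 c, pvAWindows_drop_head x c t (by omega)]
    · intro x y hxy
      by_cases h : c.toNat = y.toNat + 1
      · simp only [pvBRun]
        rw [if_pos (by simpa using h)]
        simp [pvAWindows, hxy, h]
      · simp only [pvBRun]
        rw [if_neg (by simpa using h)]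
        simp only [pvAWindows]
        rw [if_neg (by simp; intro _; omega)]
        rw [ih.1 c, pvAWindows_drop_head y c t (by omega)]

-- ===== VERDICT (by name: the statement is the Claim_ definition above) =====
theorem has_three_letter_straight_spec : Claim_equal_has_three_letter_straight := by
  intro s _
  unfold Spec_has_three_letter_straight has_three_letter_straight has_three_letter_straight_alt
  cases h : s.toList with
  | nil => rfl
  | cons c rest => exact ((pvB_eq_pvA rest).1 c).symm
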